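-- pv_equiv track=rewrite | github.com/alliance-genome/agr_automated_information_extraction | utils/entity_extraction_utils.py | prune_to_most_specific
-- ===== SOURCE A (Python) =====
-- from typing import Dict, List, Tuple, Optional, Callable, Iterable, Set
-- from collections import Counter, defaultdict, deque
--
-- def prune_to_most_specific(
--     curies: List[str],
--     rev_index: Dict[str, Set[str]],
-- ) -> Tuple[List[str], Set[str]]:
--     """
--     Keep only the most specific taxa (drop any CURIE that is an ancestor of another).
--     Returns:
--       kept (list in original order), dropped_ancestors (set)
--     """
--     if not curies:
--         return [], set()
--
--     have = set(curies)
--     ancestors: Set[str] = set()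
--
--     # climb parents transitively for each detected curie
--     for c in have:
--         q = deque(rev_index.get(c, ()))
--         while q:
--             a = q.popleft()  # removes from left end efficiently
--             if a in ancestors:
--                 continue
--             ancestors.add(a)
--             # continue walking up from this ancestor
--             q.extend(rev_index.get(a, ()))
--
--     kept: List[str] = []
--     seen: Set[str] = set()
--     for c in curies:  # preserve original order
--         if c not in ancestors and c not in seen:
--             seen.add(c)
--             kept.append(c)
--
--     dropped = (have & ancestors)
--     return kept, dropped
-- ===== SOURCE B (Python) =====
-- def prune_to_most_specific(curies, rev_index):
--     have = set(curies)
--     # edge-saturation instead of a graph walk: sweep every entry of the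
--     # reverse index over and over, adding the parents of any node already
--     # known (detected curie or ancestor found so far), until one full sweep
--     # changes nothing; the stable set is exactly the transitive ancestors.
--     ancestors = set()
--     changed = True
--     while changed:
--         changed = False
--         for k in rev_index:
--             if (k in have or k in ancestors) and not rev_index[k] <= ancestors:
--                 ancestors |= rev_index[k]
--                 changed = True
--     kept = list(dict.fromkeys(c for c in curies if c not in ancestors))
--     return kept, have & ancestors
-- ===== Notes on version B (the rewrite author's own statement) =====
-- stated objective: alternative
-- what changed: Replaced the per-curie BFS worklist (deque + visited set) by a worklist-free least-fixpoint saturation: repeated full sweeps over the reverse-index entries adding parents of already-known nodes until a sweep changes nothing; kept is built as dict.fromkeys of a filter instead of a loop with a seen set.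
import Mathlib
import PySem

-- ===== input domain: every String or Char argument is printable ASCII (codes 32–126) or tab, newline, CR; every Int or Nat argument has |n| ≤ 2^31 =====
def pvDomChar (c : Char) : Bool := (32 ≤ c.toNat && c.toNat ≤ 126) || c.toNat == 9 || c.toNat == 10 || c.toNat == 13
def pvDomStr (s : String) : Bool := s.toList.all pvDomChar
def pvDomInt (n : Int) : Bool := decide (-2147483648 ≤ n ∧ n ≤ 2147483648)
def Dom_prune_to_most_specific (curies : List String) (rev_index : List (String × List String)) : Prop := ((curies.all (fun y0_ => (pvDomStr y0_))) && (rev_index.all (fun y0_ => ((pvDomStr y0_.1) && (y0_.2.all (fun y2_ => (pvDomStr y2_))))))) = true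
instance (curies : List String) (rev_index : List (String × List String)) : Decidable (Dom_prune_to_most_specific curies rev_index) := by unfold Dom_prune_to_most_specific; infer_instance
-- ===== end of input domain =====

-- B replaces A's per-curie BFS worklist by a worklist-free least-fixpoint saturation
-- (repeated full sweeps over the reverse-index entries until nothing changes) and
-- builds kept as dict.fromkeys of a filter: alternative algorithm, same return value.

-- rev_index.get(x, ()) / rev_index[x] : first-match association-list lookup, default empty
def pvGetRev (rev : List (String × List String)) (x : String) : List String :=
  (PySem.Dict.mk rev).getD x []

-- termination bookkeeping for the two loops (A's worklist, B's saturation)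
def pvUniv (rev : List (String × List String)) : List String :=
  rev.flatMap (fun p => p.1 :: p.2)

def pvUnseen (rev : List (String × List String)) (s : PySem.Set String) : Nat :=
  ((pvUniv rev).filter (fun x => !(PySem.Set.contains s x))).length

def pvMeasure (rev : List (String × List String)) (q : List String) (s : PySem.Set String) : Nat :=
  pvUnseen rev s * ((pvUniv rev).length + 1) + q.length

theorem pvSetContains_eq (s : PySem.Set String) (x : String) :
    PySem.Set.contains s x = decide (x ∈ s) := by
  simp [PySem.Set.contains_eq_listContains, List.contains_eq_mem]

theorem pvGetRev_length_le (rev : List (String × List String)) (x : String) :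
    (pvGetRev rev x).length ≤ (pvUniv rev).length := by
  induction rev with
  | nil => simp [pvGetRev, PySem.Dict.getD, PySem.Dict.get?, pvUniv]
  | cons p rest ih =>
    obtain ⟨k, v⟩ := p
    simp only [pvGetRev, PySem.Dict.getD_eq_get?_getD, PySem.Dict.get?_mk_cons] at *
    by_cases h : (k == x) = true
    · simp [h, pvUniv]
      omega
    · rw [if_neg h]
      simp only [pvUniv, List.flatMap_cons, List.length_append, List.length_cons] at *
      omega

theorem pvGetRev_of_not_mem_univ (rev : List (String × List String)) (x : String)
    (h : x ∉ pvUniv rev) : pvGetRev rev x = [] := by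
  induction rev with
  | nil => rfl
  | cons p rest ih =>
    obtain ⟨k, v⟩ := p
    simp only [pvUniv, List.flatMap_cons, List.mem_append, List.mem_cons, not_or] at h
    simp only [pvGetRev, PySem.Dict.getD_eq_get?_getD, PySem.Dict.get?_mk_cons] at *
    have hne : ¬ ((k == x) = true) := by
      simp only [beq_iff_eq]
      exact fun he => h.1.1 he.symm
    rw [if_neg hne]
    exact ih (fun hm => h.2 hm)

theorem pvGetRev_subset_univ (rev : List (String × List String)) (k x : String)
    (hx : x ∈ pvGetRev rev k) : x ∈ pvUniv rev := by
  induction rev with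
  | nil => simp [pvGetRev, PySem.Dict.getD, PySem.Dict.get?] at hx
  | cons p rest ih =>
    obtain ⟨k', v⟩ := p
    simp only [pvGetRev, PySem.Dict.getD_eq_get?_getD, PySem.Dict.get?_mk_cons] at hx ih
    by_cases he : (k' == k) = true
    · rw [if_pos he] at hx
      simp only [Option.getD_some] at hx
      simp [pvUniv, hx]
    · rw [if_neg he] at hx
      have := ih hx
      simp only [pvUniv, List.flatMap_cons, List.mem_append] at this ⊢
      exact Or.inr this

theorem pvUnseen_add_le (rev : List (String × List String)) (s : PySem.Set String) (a : String) :
    pvUnseen rev (PySem.Set.add s a) ≤ pvUnseen rev s := by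
  unfold pvUnseen
  apply List.Sublist.length_le
  apply List.monotone_filter_right
  intro x hx
  by_cases h1 : x ∈ s <;> by_cases h2 : x = a <;>
    simp [pvSetContains_eq, PySem.Set.mem_add, h1, h2] at hx ⊢

theorem pvUnseen_add_lt (rev : List (String × List String)) (s : PySem.Set String) (a : String)
    (ha : a ∈ pvUniv rev) (hs : PySem.Set.contains s a = false) :
    pvUnseen rev (PySem.Set.add s a) < pvUnseen rev s := by
  have hns : a ∉ s := by
    rw [pvSetContains_eq] at hs
    simpa using hs
  unfold pvUnseen
  have h1 : (pvUniv rev).filter (fun x => !(PySem.Set.contains (PySem.Set.add s a) x))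
      = ((pvUniv rev).filter (fun x => !(PySem.Set.contains s x))).filter (fun x => !(x == a)) := by
    rw [List.filter_filter]
    apply List.filter_congr
    intro x _
    by_cases h1 : x ∈ s <;> by_cases h2 : x = a <;>
      simp [pvSetContains_eq, PySem.Set.mem_add, h1, h2]
  rw [h1, List.length_filter_lt_length_iff_exists]
  exact ⟨a, by simp [List.mem_filter, pvSetContains_eq, ha, hns], by simp⟩

-- q' is the new worklist: at most q plus a's parents, after marking a visited
theorem pvMeasure_step (rev : List (String × List String)) (a : String)
    (q newq : List String) (s : PySem.Set String)
    (hlen : newq.length ≤ q.length + (pvGetRev rev a).length)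
    (hs : PySem.Set.contains s a = false) :
    pvMeasure rev newq (PySem.Set.add s a) < pvMeasure rev (a :: q) s := by
  unfold pvMeasure
  by_cases ha : a ∈ pvUniv rev
  · have h1 := pvUnseen_add_lt rev s a ha hs
    have h2 : (pvUnseen rev (PySem.Set.add s a) + 1) * ((pvUniv rev).length + 1)
        ≤ pvUnseen rev s * ((pvUniv rev).length + 1) :=
      Nat.mul_le_mul_right _ h1
    have h3 := pvGetRev_length_le rev a
    rw [add_mul, one_mul] at h2
    simp only [List.length_cons]
    omega
  · have h0 : pvGetRev rev a = [] := pvGetRev_of_not_mem_univ rev a ha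
    have h1 := pvUnseen_add_le rev s a
    have h2 : pvUnseen rev (PySem.Set.add s a) * ((pvUniv rev).length + 1)
        ≤ pvUnseen rev s * ((pvUniv rev).length + 1) :=
      Nat.mul_le_mul_right _ h1
    rw [h0] at hlen
    simp only [List.length_nil, List.length_cons] at *
    omega

-- ===== PORT A =====
-- inner while-loop of A: FIFO worklist (deque: popleft, extend at the right)
def pvBFS (rev : List (String × List String)) : List String → PySem.Set String → PySem.Set String
  | [], s => s
  | a :: q, s =>
    if PySem.Set.contains s a then pvBFS rev q s
    else pvBFS rev (q ++ pvGetRev rev a) (PySem.Set.add s a)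
termination_by q s => pvMeasure rev q s
decreasing_by
  · simp [pvMeasure]
  · exact pvMeasure_step rev a q (q ++ pvGetRev rev a) s (by simp) (by simp_all)

def prune_to_most_specific (curies : List String) (rev_index : List (String × List String)) : List String × List String :=
  if curies = [] then ([], PySem.Set.empty)
  else
    let have_ : PySem.Set String := PySem.Set.ofList curies
    let ancestors : PySem.Set String :=
      have_.foldl (fun s c => pvBFS rev_index (pvGetRev rev_index c) s) PySem.Set.empty
    let ks := curies.foldl
      (fun (ks : List String × PySem.Set String) c =>
        if !(PySem.Set.contains ancestors c) && !(PySem.Set.contains ks.2 c) then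
          (ks.1 ++ [c], PySem.Set.add ks.2 c)
        else ks)
      ([], PySem.Set.empty)
    (ks.1, PySem.Set.inter have_ ancestors)

-- ===== PORT B =====
-- body of B's inner for-loop: one rev_index entry; if its key is already known
-- and its parents are not all recorded, union them in and flag the change
def pvStep (rev : List (String × List String)) (haveS : PySem.Set String)
    (st : PySem.Set String × Bool) (e : String × List String) : PySem.Set String × Bool :=
  if (PySem.Set.contains haveS e.1 || PySem.Set.contains st.1 e.1)
      && !((pvGetRev rev e.1).all (fun x => PySem.Set.contains st.1 x)) then
    (PySem.Set.update st.1 (pvGetRev rev e.1), true)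
  else st

-- one full 'for k in rev_index' sweep of B's while-loop body
def pvSweep (rev : List (String × List String)) (haveS anc : PySem.Set String) :
    PySem.Set String × Bool :=
  rev.foldl (pvStep rev haveS) (anc, false)

-- termination facts for the while-changed loop: a changing sweep strictly grows anc
theorem pvStep_mono (rev : List (String × List String)) (haveS : PySem.Set String)
    (st : PySem.Set String × Bool) (e : String × List String) (x : String)
    (hx : x ∈ st.1) : x ∈ (pvStep rev haveS st e).1 := by
  unfold pvStep
  split
  · exact (PySem.Set.mem_update _ _ _).2 (Or.inl hx)
  · exact hx

theorem pvFold_mono (rev : List (String × List String)) (haveS : PySem.Set String) :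
    ∀ (l : List (String × List String)) (st : PySem.Set String × Bool) (x : String),
      x ∈ st.1 → x ∈ (l.foldl (pvStep rev haveS) st).1 := by
  intro l
  induction l with
  | nil => intro st x hx; exact hx
  | cons e l ih =>
    intro st x hx
    exact ih _ x (pvStep_mono rev haveS st e x hx)

theorem pvFold_progress (rev : List (String × List String)) (haveS : PySem.Set String) :
    ∀ (l : List (String × List String)) (st : PySem.Set String × Bool),
      (∀ e ∈ l, e ∈ rev) →
      (l.foldl (pvStep rev haveS) st).2 = true →
      st.2 = true ∨ ∃ x ∈ pvUniv rev, x ∈ (l.foldl (pvStep rev haveS) st).1 ∧ x ∉ st.1 := by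
  intro l
  induction l with
  | nil => intro st _ h; exact Or.inl h
  | cons e l ih =>
    intro st hsub h
    simp only [List.foldl_cons] at h ⊢
    rcases ih (pvStep rev haveS st e) (fun e' he' => hsub e' (by simp [he'])) h with h2 | h2
    · unfold pvStep at h2
      by_cases hc : ((PySem.Set.contains haveS e.1 || PySem.Set.contains st.1 e.1)
          && !((pvGetRev rev e.1).all (fun x => PySem.Set.contains st.1 x))) = true
      · rw [if_pos hc] at h2
        have hex : ∃ x ∈ pvGetRev rev e.1, ¬ (PySem.Set.contains st.1 x = true) := by
          rw [Bool.and_eq_true] at hc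
          obtain ⟨_, hall⟩ := hc
          simpa [List.all_eq_true] using hall
        obtain ⟨x, hxg, hxns⟩ := hex
        refine Or.inr ⟨x, pvGetRev_subset_univ rev e.1 x hxg, ?_, ?_⟩
        · apply pvFold_mono rev haveS l
          rw [show pvStep rev haveS st e
              = (PySem.Set.update st.1 (pvGetRev rev e.1), true) from by rw [pvStep, if_pos hc]]
          exact (PySem.Set.mem_update _ _ _).2 (Or.inr hxg)
        · rw [pvSetContains_eq] at hxns
          simpa using hxns
      · rw [if_neg hc] at h2
        exact Or.inl h2
    · obtain ⟨x, hxu, hxin, hxout⟩ := h2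
      refine Or.inr ⟨x, hxu, hxin, fun hx => hxout (pvStep_mono rev haveS st e x hx)⟩

theorem pvUnseen_lt_of_new (rev : List (String × List String)) (s t : PySem.Set String)
    (hsub : ∀ y ∈ s, y ∈ t) (x : String) (hxu : x ∈ pvUniv rev) (hxt : x ∈ t) (hxs : x ∉ s) :
    pvUnseen rev t < pvUnseen rev s := by
  unfold pvUnseen
  have h1 : (pvUniv rev).filter (fun y => !(PySem.Set.contains t y))
      = ((pvUniv rev).filter (fun y => !(PySem.Set.contains s y))).filter
          (fun y => !(PySem.Set.contains t y)) := by
    rw [List.filter_filter]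
    apply List.filter_congr
    intro y _
    by_cases hy : y ∈ t
    · simp [pvSetContains_eq, hy]
    · have hys : y ∉ s := fun hys => hy (hsub y hys)
      simp [pvSetContains_eq, hy, hys]
  rw [h1, List.length_filter_lt_length_iff_exists]
  exact ⟨x, by simp [List.mem_filter, pvSetContains_eq, hxu, hxs], by simp [pvSetContains_eq, hxt]⟩

theorem pvSweep_progress (rev : List (String × List String)) (haveS anc : PySem.Set String)
    (h : (pvSweep rev haveS anc).2 = true) :
    pvUnseen rev (pvSweep rev haveS anc).1 < pvUnseen rev anc := by
  rcases pvFold_progress rev haveS rev (anc, false) (fun _ he => he) h with h2 | h2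
  · simp at h2
  · obtain ⟨x, hxu, hxin, hxout⟩ := h2
    exact pvUnseen_lt_of_new rev anc _ (fun y hy => pvFold_mono rev haveS rev (anc, false) y hy)
      x hxu hxin hxout

-- B's while-changed loop: sweep until a full sweep reports no change
def pvSaturate (rev : List (String × List String)) (haveS anc : PySem.Set String) :
    PySem.Set String :=
  if hr : (pvSweep rev haveS anc).2 = true then pvSaturate rev haveS (pvSweep rev haveS anc).1
  else (pvSweep rev haveS anc).1
termination_by pvUnseen rev anc
decreasing_by exact pvSweep_progress rev haveS anc hr

def prune_to_most_specific_alt (curies : List String) (rev_index : List (String × List String)) : List String × List String :=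
  let have_ : PySem.Set String := PySem.Set.ofList curies
  let ancestors : PySem.Set String := pvSaturate rev_index have_ PySem.Set.empty
  let kept := PySem.List.dedup (curies.filter (fun c => !(PySem.Set.contains ancestors c)))
  (kept, PySem.Set.inter have_ ancestors)

-- ===== PRECONDITION & SPEC =====
def Spec_prune_to_most_specific (curies : List String) (rev_index : List (String × List String)) (out : List String × List String) : Prop := out = prune_to_most_specific_alt curies rev_index
instance (curies : List String) (rev_index : List (String × List String)) (out : List String × List String) : Decidable (Spec_prune_to_most_specific curies rev_index out) := by unfold Spec_prune_to_most_specific; infer_instance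

-- ===== CLAIM (what is proved, stated in full; the proofs are below) =====
def Claim_equal_prune_to_most_specific : Prop := ∀ (curies : List String) (rev_index : List (String × List String)), Dom_prune_to_most_specific curies rev_index → Spec_prune_to_most_specific curies rev_index (prune_to_most_specific curies rev_index)

-- ===== LEMMAS AND PROOFS =====

-- worklist invariant for A: every parent of a visited node is visited or still queued
def pvInv (rev : List (String × List String)) (q : List String) (s : PySem.Set String) : Prop :=
  ∀ a ∈ s, ∀ b ∈ pvGetRev rev a, b ∈ s ∨ b ∈ q

-- transitive reachability upward from a seed list through the reverse index
inductive pvReach (rev : List (String × List String)) (seeds : List String) : String → Prop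
  | base {x : String} : x ∈ seeds → pvReach rev seeds x
  | step {y x : String} : pvReach rev seeds y → x ∈ pvGetRev rev y → pvReach rev seeds x

theorem pvReach_nil {rev : List (String × List String)} {x : String} :
    ¬ pvReach rev [] x := by
  intro h
  induction h with
  | base h => simp at h
  | step _ _ ih => exact ih

theorem pvReach_mono {rev : List (String × List String)} {s1 s2 : List String} {x : String}
    (hs : ∀ z ∈ s1, z ∈ s2) (h : pvReach rev s1 x) : pvReach rev s2 x := by
  induction h with
  | base h => exact .base (hs _ h)
  | step _ hm ih => exact .step ih hm

theorem pvReach_trans {rev : List (String × List String)} {s1 s2 : List String} {x : String}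
    (h : pvReach rev s2 x) (hall : ∀ b ∈ s2, pvReach rev s1 b) : pvReach rev s1 x := by
  induction h with
  | base h => exact hall _ h
  | step _ hm ih => exact .step ih hm

theorem pvReach_append {rev : List (String × List String)} {u v : List String} {x : String} :
    pvReach rev (u ++ v) x ↔ pvReach rev u x ∨ pvReach rev v x := by
  constructor
  · intro h
    induction h with
    | base h =>
      rcases List.mem_append.1 h with h | h
      exacts [Or.inl (.base h), Or.inr (.base h)]
    | step _ hm ih =>
      rcases ih with ih | ih
      exacts [Or.inl (.step ih hm), Or.inr (.step ih hm)]
  · intro h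
    rcases h with h | h <;> exact pvReach_mono (by intro z hz; simp [hz]) h

theorem pvReach_getRev_cons {rev : List (String × List String)} {a : String} {q : List String}
    {x : String} (h : pvReach rev (pvGetRev rev a) x) : pvReach rev (a :: q) x :=
  pvReach_trans h (fun _ hb => .step (.base (by simp)) hb)

theorem pvReach_cons_of_mem {rev : List (String × List String)} {a : String} {q : List String}
    {s : PySem.Set String} {x : String} (ha : a ∈ s) (hInv : pvInv rev (a :: q) s)
    (h : pvReach rev (a :: q) x) : x ∈ s ∨ pvReach rev q x := by
  induction h with
  | base h =>
    rcases List.mem_cons.1 h with h | h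
    · exact Or.inl (h ▸ ha)
    · exact Or.inr (.base h)
  | step _ hm ih =>
    rcases ih with hxs | hr
    · rcases hInv _ hxs _ hm with h | h
      · exact Or.inl h
      · rcases List.mem_cons.1 h with h | h
        · exact Or.inl (h ▸ ha)
        · exact Or.inr (.base h)
    · exact Or.inr (.step hr hm)

theorem pvReach_cons_split {rev : List (String × List String)} {a : String} {q : List String}
    {s : PySem.Set String} {x : String} (hInv : pvInv rev (a :: q) s)
    (h : pvReach rev (a :: q) x) :
    x ∈ PySem.Set.add s a ∨ pvReach rev q x ∨ pvReach rev (pvGetRev rev a) x := by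
  induction h with
  | base h =>
    rcases List.mem_cons.1 h with h | h
    · exact Or.inl ((PySem.Set.mem_add _ _ _).2 (Or.inr h))
    · exact Or.inr (Or.inl (.base h))
  | step _ hm ih =>
    rcases ih with hmem | hr | hr
    · rcases (PySem.Set.mem_add _ _ _).1 hmem with hys | hya
      · rcases hInv _ hys _ hm with h | h
        · exact Or.inl ((PySem.Set.mem_add _ _ _).2 (Or.inl h))
        · rcases List.mem_cons.1 h with h | h
          · exact Or.inl ((PySem.Set.mem_add _ _ _).2 (Or.inr h))
          · exact Or.inr (Or.inl (.base h))
      · exact Or.inr (Or.inr (.base (hya ▸ hm)))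
    · exact Or.inr (Or.inl (.step hr hm))
    · exact Or.inr (Or.inr (.step hr hm))

-- the invariant for the new state after visiting a fresh node a, parents pushed as ext
theorem pvInv_push {rev : List (String × List String)} {a : String} {q ext : List String}
    {s : PySem.Set String} (hInv : pvInv rev (a :: q) s)
    (hext : ∀ b, b ∈ q ∨ b ∈ pvGetRev rev a → b ∈ ext) :
    pvInv rev ext (PySem.Set.add s a) := by
  intro a' ha' b hb
  rcases (PySem.Set.mem_add _ _ _).1 ha' with h | h
  · rcases hInv _ h _ hb with h2 | h2
    · exact Or.inl ((PySem.Set.mem_add _ _ _).2 (Or.inl h2))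
    · rcases List.mem_cons.1 h2 with h2 | h2
      · exact Or.inl ((PySem.Set.mem_add _ _ _).2 (Or.inr h2))
      · exact Or.inr (hext _ (Or.inl h2))
  · exact Or.inr (hext _ (Or.inr (h ▸ hb)))

theorem pvBFS_spec (rev : List (String × List String)) :
    ∀ (q : List String) (s : PySem.Set String), pvInv rev q s →
      pvInv rev [] (pvBFS rev q s) ∧
        ∀ x, (x ∈ pvBFS rev q s ↔ x ∈ s ∨ pvReach rev q x) := by
  intro q s
  induction q, s using pvBFS.induct rev with
  | case1 s =>
    intro hInv
    refine ⟨by simpa [pvBFS] using hInv, fun x => ?_⟩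
    simp only [pvBFS]
    exact ⟨fun h => Or.inl h, fun h => h.resolve_right pvReach_nil⟩
  | case2 a q s hcon ih =>
    intro hInv
    have has : a ∈ s := by rw [pvSetContains_eq] at hcon; simpa using hcon
    have hInv' : pvInv rev q s := by
      intro a' ha' b hb
      rcases hInv _ ha' _ hb with h | h
      · exact Or.inl h
      · rcases List.mem_cons.1 h with h | h
        · exact Or.inl (h ▸ has)
        · exact Or.inr h
    obtain ⟨h1, h2⟩ := ih hInv'
    rw [show pvBFS rev (a :: q) s = pvBFS rev q s from by rw [pvBFS, if_pos hcon]]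
    refine ⟨h1, fun x => ?_⟩
    rw [h2 x]
    constructor
    · rintro (h | h)
      exacts [Or.inl h, Or.inr (pvReach_mono (by intro z hz; simp [hz]) h)]
    · rintro (h | h)
      · exact Or.inl h
      · exact pvReach_cons_of_mem has hInv h
  | case3 a q s hcon ih =>
    intro hInv
    have hInv' : pvInv rev (q ++ pvGetRev rev a) (PySem.Set.add s a) :=
      pvInv_push hInv (by intro b hb; rcases hb with h | h <;> simp [h])
    obtain ⟨h1, h2⟩ := ih hInv'
    rw [show pvBFS rev (a :: q) s = pvBFS rev (q ++ pvGetRev rev a) (PySem.Set.add s a) from by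
      rw [pvBFS, if_neg (by simp [pvSetContains_eq]; simpa [pvSetContains_eq] using hcon)]]
    refine ⟨h1, fun x => ?_⟩
    rw [h2 x]
    constructor
    · rintro (h | h)
      · rcases (PySem.Set.mem_add _ _ _).1 h with h | h
        exacts [Or.inl h, Or.inr (.base (by simp [h]))]
      · rcases pvReach_append.1 h with h | h
        · exact Or.inr (pvReach_mono (by intro z hz; simp [hz]) h)
        · exact Or.inr (pvReach_getRev_cons h)
    · rintro (h | h)
      · exact Or.inl ((PySem.Set.mem_add _ _ _).2 (Or.inl h))
      · rcases pvReach_cons_split hInv h with h | h | h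
        · exact Or.inl h
        · exact Or.inr (pvReach_append.2 (Or.inl h))
        · exact Or.inr (pvReach_append.2 (Or.inr h))

theorem pvFoldBFS (rev : List (String × List String)) :
    ∀ (l : List String) (s : PySem.Set String), pvInv rev [] s →
      pvInv rev [] (l.foldl (fun s c => pvBFS rev (pvGetRev rev c) s) s) ∧
        ∀ x, (x ∈ l.foldl (fun s c => pvBFS rev (pvGetRev rev c) s) s ↔
          x ∈ s ∨ pvReach rev (l.flatMap (fun c => pvGetRev rev c)) x) := by
  intro l
  induction l with
  | nil =>
    intro s h
    exact ⟨h, fun x => by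
      simp only [List.foldl_nil, List.flatMap_nil]
      exact ⟨fun h => Or.inl h, fun h => h.resolve_right pvReach_nil⟩⟩
  | cons c l ih =>
    intro s hcl
    have hInv : pvInv rev (pvGetRev rev c) s := by
      intro a ha b hb
      exact Or.inl ((hcl a ha b hb).resolve_right (by simp))
    obtain ⟨h1, h2⟩ := pvBFS_spec rev (pvGetRev rev c) s hInv
    obtain ⟨h3, h4⟩ := ih _ h1
    refine ⟨h3, fun x => ?_⟩
    simp only [List.foldl_cons, List.flatMap_cons]
    rw [h4 x, h2 x, pvReach_append]
    tauto

-- B-side: soundness — every element a sweep adds is reachable from the seeds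
theorem pvFold_sound (rev : List (String × List String)) (haveS : PySem.Set String) :
    ∀ (l : List (String × List String)) (st : PySem.Set String × Bool),
      (∀ y ∈ st.1, pvReach rev (haveS.flatMap (fun c => pvGetRev rev c)) y) →
      ∀ x ∈ (l.foldl (pvStep rev haveS) st).1,
        pvReach rev (haveS.flatMap (fun c => pvGetRev rev c)) x := by
  intro l
  induction l with
  | nil => intro st h x hx; exact h x hx
  | cons e l ih =>
    intro st h
    simp only [List.foldl_cons]
    apply ih
    intro y hy
    unfold pvStep at hy
    by_cases hc : ((PySem.Set.contains haveS e.1 || PySem.Set.contains st.1 e.1)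
        && !((pvGetRev rev e.1).all (fun x => PySem.Set.contains st.1 x))) = true
    · rw [if_pos hc] at hy
      rcases (PySem.Set.mem_update _ _ _).1 hy with hy | hy
      · exact h y hy
      · rw [Bool.and_eq_true] at hc
        obtain ⟨hk, _⟩ := hc
        rw [Bool.or_eq_true] at hk
        rcases hk with hk | hk
        · have hkh : e.1 ∈ haveS := by rw [pvSetContains_eq] at hk; simpa using hk
          exact .base (List.mem_flatMap.2 ⟨e.1, hkh, hy⟩)
        · have hks : e.1 ∈ st.1 := by rw [pvSetContains_eq] at hk; simpa using hk
          exact .step (h e.1 hks) hy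
    · rw [if_neg hc] at hy
      exact h y hy

theorem pvSaturate_sound (rev : List (String × List String)) (haveS : PySem.Set String) :
    ∀ (anc : PySem.Set String),
      (∀ y ∈ anc, pvReach rev (haveS.flatMap (fun c => pvGetRev rev c)) y) →
      ∀ x ∈ pvSaturate rev haveS anc,
        pvReach rev (haveS.flatMap (fun c => pvGetRev rev c)) x := by
  intro anc
  induction anc using pvSaturate.induct rev haveS with
  | case1 anc hr ih =>
    intro h x hx
    rw [show pvSaturate rev haveS anc = pvSaturate rev haveS (pvSweep rev haveS anc).1 from by
      rw [pvSaturate, dif_pos hr]] at hx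
    exact ih (pvFold_sound rev haveS rev (anc, false) h) x hx
  | case2 anc hr =>
    intro h x hx
    rw [show pvSaturate rev haveS anc = (pvSweep rev haveS anc).1 from by
      rw [pvSaturate, dif_neg hr]] at hx
    exact pvFold_sound rev haveS rev (anc, false) h x hx

-- the change flag is monotone along the fold: once set it stays set
theorem pvFold_flag (rev : List (String × List String)) (haveS : PySem.Set String) :
    ∀ (l : List (String × List String)) (st : PySem.Set String × Bool),
      (l.foldl (pvStep rev haveS) st).2 = false → st.2 = false := by
  intro l
  induction l with
  | nil => intro st h; exact h
  | cons e l ih =>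
    intro st h
    simp only [List.foldl_cons] at h
    have h2 := ih _ h
    unfold pvStep at h2
    by_cases hc : ((PySem.Set.contains haveS e.1 || PySem.Set.contains st.1 e.1)
        && !((pvGetRev rev e.1).all (fun x => PySem.Set.contains st.1 x))) = true
    · rw [if_pos hc] at h2
      simp at h2
    · rwa [if_neg hc] at h2

-- a sweep that reports no change left its set unchanged and that set is closed on every entry
theorem pvFold_stable (rev : List (String × List String)) (haveS : PySem.Set String) :
    ∀ (l : List (String × List String)) (st : PySem.Set String × Bool),
      (l.foldl (pvStep rev haveS) st).2 = false →
      (l.foldl (pvStep rev haveS) st).1 = st.1 ∧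
        ∀ e ∈ l, (e.1 ∈ haveS ∨ e.1 ∈ st.1) → ∀ x ∈ pvGetRev rev e.1, x ∈ st.1 := by
  intro l
  induction l with
  | nil => intro st _; exact ⟨rfl, by simp⟩
  | cons e l ih =>
    intro st h
    simp only [List.foldl_cons] at h ⊢
    by_cases hc : ((PySem.Set.contains haveS e.1 || PySem.Set.contains st.1 e.1)
        && !((pvGetRev rev e.1).all (fun x => PySem.Set.contains st.1 x))) = true
    · exfalso
      have hstep : pvStep rev haveS st e = (PySem.Set.update st.1 (pvGetRev rev e.1), true) := by
        rw [pvStep, if_pos hc]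
      rw [hstep] at h
      have := pvFold_flag rev haveS l _ h
      simp at this
    · have hstep : pvStep rev haveS st e = st := by rw [pvStep, if_neg hc]
      rw [hstep] at h
      obtain ⟨h1, h2⟩ := ih st h
      rw [hstep]
      refine ⟨h1, fun e' he' hk x hx => ?_⟩
      rcases List.mem_cons.1 he' with he' | he'
      · subst he'
        have hA : (PySem.Set.contains haveS e'.1 || PySem.Set.contains st.1 e'.1) = true := by
          rcases hk with hk | hk <;> simp [pvSetContains_eq, hk]
        have hB : ((pvGetRev rev e'.1).all (fun x => PySem.Set.contains st.1 x)) = true := by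
          by_contra hB
          have hB' : ((pvGetRev rev e'.1).all (fun x => PySem.Set.contains st.1 x)) = false :=
            Bool.eq_false_iff.2 hB
          exact hc (by rw [hB', hA]; rfl)
        rw [List.all_eq_true] at hB
        have := hB x hx
        rw [pvSetContains_eq] at this
        simpa using this
      · exact h2 e' he' hk x hx

-- the saturated set is closed: parents of any known node (via first-match lookup) are in it
theorem pvKey_of_getRev (rev : List (String × List String)) (k x : String)
    (hx : x ∈ pvGetRev rev k) : ∃ e ∈ rev, e.1 = k := by
  induction rev with
  | nil => simp [pvGetRev, PySem.Dict.getD, PySem.Dict.get?] at hx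
  | cons p rest ih =>
    obtain ⟨k', v⟩ := p
    simp only [pvGetRev, PySem.Dict.getD_eq_get?_getD, PySem.Dict.get?_mk_cons] at hx
    by_cases he : (k' == k) = true
    · exact ⟨(k', v), by simp, by simpa using he⟩
    · rw [if_neg he] at hx
      obtain ⟨e, he1, he2⟩ := ih hx
      exact ⟨e, by simp [he1], he2⟩

def pvClosed (rev : List (String × List String)) (haveS F : PySem.Set String) : Prop :=
  ∀ k, (k ∈ haveS ∨ k ∈ F) → ∀ x ∈ pvGetRev rev k, x ∈ F

theorem pvSaturate_closed (rev : List (String × List String)) (haveS : PySem.Set String) :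
    ∀ (anc : PySem.Set String), pvClosed rev haveS (pvSaturate rev haveS anc) := by
  intro anc
  induction anc using pvSaturate.induct rev haveS with
  | case1 anc hr ih =>
    rw [show pvSaturate rev haveS anc = pvSaturate rev haveS (pvSweep rev haveS anc).1 from by
      rw [pvSaturate, dif_pos hr]]
    exact ih
  | case2 anc hr =>
    rw [show pvSaturate rev haveS anc = (pvSweep rev haveS anc).1 from by
      rw [pvSaturate, dif_neg hr]]
    rw [Bool.not_eq_true] at hr
    unfold pvSweep at hr ⊢
    obtain ⟨h1, h2⟩ := pvFold_stable rev haveS rev (anc, false) hr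
    rw [h1]
    intro k hk x hx
    obtain ⟨e, her, hek⟩ := pvKey_of_getRev rev k x hx
    exact h2 e her (hek ▸ hk) x (hek ▸ hx)

theorem pvReach_mem_closed (rev : List (String × List String)) (haveS F : PySem.Set String)
    (hcl : pvClosed rev haveS F) :
    ∀ x, pvReach rev (haveS.flatMap (fun c => pvGetRev rev c)) x → x ∈ F := by
  intro x h
  induction h with
  | base h =>
    obtain ⟨c, hc, hm⟩ := List.mem_flatMap.1 h
    exact hcl c (Or.inl hc) _ hm
  | step _ hm ih => exact hcl _ (Or.inr ih) _ hm

theorem pvSaturate_mem (rev : List (String × List String)) (haveS : PySem.Set String) (x : String) :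
    x ∈ pvSaturate rev haveS PySem.Set.empty ↔
      pvReach rev (haveS.flatMap (fun c => pvGetRev rev c)) x := by
  constructor
  · exact pvSaturate_sound rev haveS PySem.Set.empty (by intro y hy; simp [PySem.Set.empty] at hy) x
  · exact pvReach_mem_closed rev haveS _ (pvSaturate_closed rev haveS PySem.Set.empty) x

-- A's interleaved filter-and-dedup loop is the dedup of the filter
theorem pvKeptEq (anc1 anc2 : PySem.Set String) (hanc : ∀ x, x ∈ anc1 ↔ x ∈ anc2) :
    ∀ (l k : List String) (sn : PySem.Set String), (∀ x, x ∈ sn ↔ x ∈ k) →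
      (l.foldl (fun (ks : List String × PySem.Set String) c =>
          if !(PySem.Set.contains anc1 c) && !(PySem.Set.contains ks.2 c) then
            (ks.1 ++ [c], PySem.Set.add ks.2 c)
          else ks) (k, sn)).1
        = (l.filter (fun c => !(PySem.Set.contains anc2 c))).foldl PySem.Set.add k := by
  intro l
  induction l with
  | nil => intro k sn h; rfl
  | cons c l ih =>
    intro k sn h
    by_cases hanc1 : c ∈ anc1
    · have h1 : (!(PySem.Set.contains anc1 c) && !(PySem.Set.contains sn c)) = false := by
        simp [pvSetContains_eq, hanc1]
      have h2 : (!(PySem.Set.contains anc2 c)) = false := by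
        simp [pvSetContains_eq, (hanc c).1 hanc1]
      simp only [List.foldl_cons, List.filter_cons, h1, h2, Bool.false_eq_true, if_false]
      exact ih k sn h
    · have h2 : (!(PySem.Set.contains anc2 c)) = true := by
        simp [pvSetContains_eq]
        exact fun hm => hanc1 ((hanc c).2 hm)
      by_cases hsn : c ∈ sn
      · have h1 : (!(PySem.Set.contains anc1 c) && !(PySem.Set.contains sn c)) = false := by
          simp [pvSetContains_eq, hsn]
        simp only [List.foldl_cons, List.filter_cons, h1, h2, Bool.false_eq_true, if_false,
          if_true]
        rw [PySem.Set.add_of_mem ((h c).1 hsn)]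
        exact ih k sn h
      · have h1 : (!(PySem.Set.contains anc1 c) && !(PySem.Set.contains sn c)) = true := by
          simp [pvSetContains_eq, hanc1, hsn]
        simp only [List.foldl_cons, List.filter_cons, h1, h2, if_true]
        rw [show PySem.Set.add k c = k ++ [c] from
          PySem.Set.add_of_not_mem (fun hm => hsn ((h c).2 hm))]
        apply ih
        intro x
        rw [PySem.Set.add_of_not_mem hsn]
        simp only [List.mem_append, List.mem_singleton]
        rw [h x]

-- ===== VERDICT (by name: the statement is the Claim_ definition above) =====
theorem prune_to_most_specific_spec : Claim_equal_prune_to_most_specific := by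
  intro curies rev _
  unfold Spec_prune_to_most_specific
  by_cases hc : curies = []
  · subst hc
    simp [prune_to_most_specific, prune_to_most_specific_alt, PySem.Set.inter,
      PySem.Set.ofList, PySem.Set.empty]
  · have hInvE : pvInv rev [] PySem.Set.empty := by
      intro a ha
      simp [PySem.Set.empty] at ha
    obtain ⟨_, hA⟩ := pvFoldBFS rev (PySem.Set.ofList curies) PySem.Set.empty hInvE
    have hmem : ∀ x,
        (x ∈ (PySem.Set.ofList curies).foldl
            (fun s c => pvBFS rev (pvGetRev rev c) s) PySem.Set.empty) ↔
        (x ∈ pvSaturate rev (PySem.Set.ofList curies) PySem.Set.empty) := by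
      intro x
      rw [hA x, pvSaturate_mem]
      constructor
      · intro h
        exact h.resolve_left (by simp [PySem.Set.empty])
      · exact Or.inr
    simp only [prune_to_most_specific, prune_to_most_specific_alt, if_neg hc]
    refine Prod.ext ?_ ?_
    · rw [PySem.List.dedup_eq_ofList, PySem.Set.ofList_eq_foldl]
      exact pvKeptEq _ _ hmem curies [] PySem.Set.empty (by simp [PySem.Set.empty])
    · unfold PySem.Set.inter
      apply List.filter_congr
      intro x _
      have hx := hmem x
      simp only [PySem.Set.empty] at hx
      simp [List.contains_eq_mem, hx]
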